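-- pv_equiv track=rewrite | github.com/nurazizdev/python_some_code | isdivisebleby_.py | isDivisibleBy9
-- ===== SOURCE A (Python) =====
-- def isDivisibleBy9(num):
--   s=str(num)
--   h=0
--   for i in range(len(s)):
--     h+=int(s[i])
--   if h%9==0:
--     return True
--   return False
-- ===== SOURCE B (Python) =====
-- def isDivisibleBy9(num):
--     total = sum(int(c) for c in str(num))
--     while total > 9:
--         t = 0
--         n = total
--         while n > 0:
--             t += n % 10
--             n //= 10
--         total = t
--     return total == 9 or total == 0
-- ===== Notes on version B (the rewrite author's own statement) =====
-- stated objective: alternative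
-- what changed: The divisibility test is replaced by a digital-root computation: after the digit sum over str(num), B repeatedly replaces the running total by the sum of its own digits (computed arithmetically with % and //) until it is a single digit, and returns total == 9 or total == 0, instead of A's indexed loop over range(len(s)) followed by a single h % 9 test.
import Mathlib
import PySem

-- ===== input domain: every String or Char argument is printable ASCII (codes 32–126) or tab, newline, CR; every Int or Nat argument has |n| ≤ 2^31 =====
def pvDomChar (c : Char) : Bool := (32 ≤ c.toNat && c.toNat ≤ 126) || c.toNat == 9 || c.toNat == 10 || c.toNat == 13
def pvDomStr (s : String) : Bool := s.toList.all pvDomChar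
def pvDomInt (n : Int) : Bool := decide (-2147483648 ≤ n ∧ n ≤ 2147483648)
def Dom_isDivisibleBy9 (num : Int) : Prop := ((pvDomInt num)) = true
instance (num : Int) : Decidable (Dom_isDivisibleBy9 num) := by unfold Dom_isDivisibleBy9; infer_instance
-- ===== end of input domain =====

-- B replaces A's single h % 9 test by a digital-root reduction loop (alternative decomposition, same cost).


-- ===== PORT A =====
-- int(s[i]) on a one-character string: PySem.Int.ofChars? [c]; .getD 0 is the total form, exact under Pre_ (num ≥ 0 ⇒ every char is a digit)
def isDivisibleBy9 (num : Int) : Bool :=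
  let s := PySem.Int.toChars num
  let h := (PySem.List.pyRange 0 (s.length : Int) 1).foldl
    (fun h i => h + (PySem.Int.ofChars? [PySem.List.pyGetD s i ' ']).getD 0) 0
  if PySem.Int.mod h 9 == 0 then true else false

-- ===== PORT B =====
-- inner while loop of Source B: t accumulates n % 10 while n //= 10
def pvDigitSumInt (n : Int) : Int :=
  if 0 < n then PySem.Int.mod n 10 + pvDigitSumInt (PySem.Int.floordiv n 10) else 0
termination_by n.toNat
decreasing_by
  rw [PySem.Int.floordiv_eq_ediv_of_pos (by omega : (0:Int) < 10)]
  omega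

theorem pvDigitSumInt_le (n : Int) (hn : 0 ≤ n) : pvDigitSumInt n ≤ n := by
  rw [pvDigitSumInt]
  split
  · rename_i h
    rw [PySem.Int.mod_eq_emod_of_pos (by omega : (0:Int) < 10),
        PySem.Int.floordiv_eq_ediv_of_pos (by omega : (0:Int) < 10)]
    have := pvDigitSumInt_le (n / 10) (by omega)
    omega
  · omega
termination_by n.toNat
decreasing_by
  omega

theorem pvDigitSumInt_lt (n : Int) (hn : 9 < n) : pvDigitSumInt n < n := by
  rw [pvDigitSumInt]
  rw [if_pos (by omega : (0:Int) < n)]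
  rw [PySem.Int.mod_eq_emod_of_pos (by omega : (0:Int) < 10),
      PySem.Int.floordiv_eq_ediv_of_pos (by omega : (0:Int) < 10)]
  have := pvDigitSumInt_le (n / 10) (by omega)
  omega

-- outer while loop of Source B: reduce total until it is a single digit
def pvDroot (total : Int) : Int :=
  if 9 < total then pvDroot (pvDigitSumInt total) else total
termination_by total.toNat
decreasing_by
  rename_i h
  have h1 := pvDigitSumInt_lt total h
  omega

def isDivisibleBy9_alt (num : Int) : Bool :=
  let total := ((PySem.Int.toChars num).map
    (fun c => (PySem.Int.ofChars? [c]).getD 0)).sum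
  let r := pvDroot total
  r == 9 || r == 0

-- ===== PRECONDITION & SPEC =====
-- A raises ValueError on every negative num (int('-')); Pre_ excludes exactly those inputs
def Pre_isDivisibleBy9 (num : Int) : Prop := 0 ≤ num
instance (num : Int) : Decidable (Pre_isDivisibleBy9 num) := by unfold Pre_isDivisibleBy9; infer_instance
def pvWitness_isDivisibleBy9 : Int := 18

def Spec_isDivisibleBy9 (num : Int) (out : Bool) : Prop := out = isDivisibleBy9_alt num
instance (num : Int) (out : Bool) : Decidable (Spec_isDivisibleBy9 num out) := by unfold Spec_isDivisibleBy9; infer_instance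

-- ===== CLAIM (what is proved, stated in full; the proofs are below) =====
def Claim_equal_isDivisibleBy9 : Prop := ∀ (num : Int), Dom_isDivisibleBy9 num → Pre_isDivisibleBy9 num → Spec_isDivisibleBy9 num (isDivisibleBy9 num)

-- ===== LEMMAS AND PROOFS =====

theorem pvDigitSumInt_nonneg (n : Int) : 0 ≤ pvDigitSumInt n := by
  rw [pvDigitSumInt]
  split
  · have := PySem.Int.mod_nonneg n (by omega : (0:Int) < 10)
    have := pvDigitSumInt_nonneg (PySem.Int.floordiv n 10)
    omega
  · omega
termination_by n.toNat
decreasing_by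
  rw [PySem.Int.floordiv_eq_ediv_of_pos (by omega : (0:Int) < 10)]
  omega

-- Nat.digitChar always yields one of 17 concrete characters; int() of each single char is a nonneg digit or a ValueError
theorem pv_digitChar_nonneg (m : Nat) :
    0 ≤ (PySem.Int.ofChars? [Nat.digitChar m]).getD 0 := by
  by_cases h : m < 16
  · interval_cases m <;> decide
  · have h17 : Nat.digitChar m = '*' := by
      unfold Nat.digitChar
      rw [if_neg (by omega), if_neg (by omega), if_neg (by omega), if_neg (by omega),
          if_neg (by omega), if_neg (by omega), if_neg (by omega), if_neg (by omega),
          if_neg (by omega), if_neg (by omega), if_neg (by omega), if_neg (by omega),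
          if_neg (by omega), if_neg (by omega), if_neg (by omega), if_neg (by omega)]
    rw [h17]; decide

theorem pv_toDigitsCore_nonneg (fuel : Nat) :
    ∀ (n : Nat) (ds : List Char),
    (∀ c ∈ ds, 0 ≤ (PySem.Int.ofChars? [c]).getD 0) →
    ∀ c ∈ Nat.toDigitsCore 10 fuel n ds, 0 ≤ (PySem.Int.ofChars? [c]).getD 0 := by
  induction fuel with
  | zero => intro n ds hds c hc; exact hds c hc
  | succ f ih =>
    intro n ds hds c hc
    rw [Nat.toDigitsCore] at hc
    split at hc
    · rw [List.mem_cons] at hc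
      rcases hc with h | h
      · subst h; exact pv_digitChar_nonneg _
      · exact hds c h
    · refine ih _ _ ?_ c hc
      intro c' hc'
      rw [List.mem_cons] at hc'
      rcases hc' with h | h
      · subst h; exact pv_digitChar_nonneg _
      · exact hds c' h

theorem pv_total_nonneg (num : Int) (hnum : 0 ≤ num) :
    0 ≤ ((PySem.Int.toChars num).map
      (fun c => (PySem.Int.ofChars? [c]).getD 0)).sum := by
  apply List.sum_nonneg
  intro x hx
  rw [List.mem_map] at hx
  obtain ⟨c, hc, rfl⟩ := hx
  have : c ∈ Nat.toDigits 10 num.toNat := by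
    simpa [PySem.Int.toChars, not_lt.mpr hnum] using hc
  rw [Nat.toDigits] at this
  exact pv_toDigitsCore_nonneg _ _ _ (by simp) c this

theorem pvDigitSumInt_mod9 (n : Int) (hn : 0 ≤ n) :
    pvDigitSumInt n % 9 = n % 9 := by
  rw [pvDigitSumInt]
  split
  · rename_i h
    rw [PySem.Int.mod_eq_emod_of_pos (by omega : (0:Int) < 10),
        PySem.Int.floordiv_eq_ediv_of_pos (by omega : (0:Int) < 10)]
    have ih := pvDigitSumInt_mod9 (n / 10) (by omega)
    omega
  · omega
termination_by n.toNat
decreasing_by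
  omega

theorem pvDroot_mod9 (n : Int) (hn : 0 ≤ n) : pvDroot n % 9 = n % 9 := by
  rw [pvDroot]
  split
  · rename_i h
    have ih := pvDroot_mod9 (pvDigitSumInt n) (pvDigitSumInt_nonneg n)
    rw [ih, pvDigitSumInt_mod9 n hn]
  · rfl
termination_by n.toNat
decreasing_by
  rename_i h
  have h1 := pvDigitSumInt_lt n h
  omega

theorem pvDroot_bounds (n : Int) (hn : 0 ≤ n) : 0 ≤ pvDroot n ∧ pvDroot n ≤ 9 := by
  rw [pvDroot]
  split
  · exact pvDroot_bounds (pvDigitSumInt n) (pvDigitSumInt_nonneg n)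
  · omega
termination_by n.toNat
decreasing_by
  rename_i h
  have h1 := pvDigitSumInt_lt n h
  omega

-- ===== VERDICT (by name: the statement is the Claim_ definition above) =====
theorem isDivisibleBy9_spec : Claim_equal_isDivisibleBy9 := by
  intro num _ hpre
  unfold Spec_isDivisibleBy9 isDivisibleBy9 isDivisibleBy9_alt
  simp only []
  rw [PySem.List.foldl_pyRange_zero_pyGetD' (PySem.Int.toChars num) ' '
        (fun h c => h + (PySem.Int.ofChars? [c]).getD 0) 0,
      PySem.List.foldl_add]
  set t := ((PySem.Int.toChars num).map
    (fun c => (PySem.Int.ofChars? [c]).getD 0)).sum with ht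
  have hnn : 0 ≤ t := pv_total_nonneg num hpre
  have hmod := pvDroot_mod9 t hnn
  have hb := pvDroot_bounds t hnn
  rw [PySem.Int.mod_eq_emod_of_pos (by omega : (0:Int) < 9)]
  rw [zero_add]
  by_cases h9 : t % 9 = 0
  · rw [if_pos (by simpa using h9)]
    have hr : pvDroot t = 9 ∨ pvDroot t = 0 := by omega
    rcases hr with h | h <;> simp [h]
  · rw [if_neg (by simpa using h9)]
    have hr : pvDroot t ≠ 9 ∧ pvDroot t ≠ 0 := by omega
    simp [hr.1, hr.2]
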